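-- pv_equiv track=rewrite | github.com/oizgagin/adventofcode2024 | 23/2.py | solution
-- ===== SOURCE A (Python) =====
-- def solution(lan):
--
--     def build(node):
--         curr = set([node])
--         for key in lan.keys():
--             if key in curr: continue
--             if all(key in lan[v] for v in curr):
--                 curr.add(key)
--         return curr
--
--     max_ = set()
--     for key in lan.keys():
--         component = build(key)
--         if len(component) > len(max_): max_ = component
--     return ",".join(sorted(max_))
-- ===== SOURCE B (Python) =====
-- def solution(lan):
--     keys = list(lan.keys())
--
--     # Grow a clique by recursion on a shrinking candidate list: always take the
--     # first remaining candidate and filter the rest down to its neighbours.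
--     def grow(curr, cands):
--         if not cands:
--             return curr
--         c = cands[0]
--         return grow(curr + [c], [k for k in cands[1:] if k in lan[c]])
--
--     comps = [grow([node], [k for k in keys if k != node and k in lan[node]])
--              for node in keys]
--     best = []
--     for c in comps:
--         if len(c) > len(best):
--             best = c
--     return ",".join(sorted(best))
-- ===== Notes on version B (the rewrite author's own statement) =====
-- stated objective: faster
-- what changed: Replaces the greedy fold that rescans every current clique member via all() for each key by a recursive grow over a shrinking candidate list: take the first candidate, filter the remaining candidates down to its neighbours, so each key is tested once against one adjacency list instead of against every clique member.
import Mathlib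
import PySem

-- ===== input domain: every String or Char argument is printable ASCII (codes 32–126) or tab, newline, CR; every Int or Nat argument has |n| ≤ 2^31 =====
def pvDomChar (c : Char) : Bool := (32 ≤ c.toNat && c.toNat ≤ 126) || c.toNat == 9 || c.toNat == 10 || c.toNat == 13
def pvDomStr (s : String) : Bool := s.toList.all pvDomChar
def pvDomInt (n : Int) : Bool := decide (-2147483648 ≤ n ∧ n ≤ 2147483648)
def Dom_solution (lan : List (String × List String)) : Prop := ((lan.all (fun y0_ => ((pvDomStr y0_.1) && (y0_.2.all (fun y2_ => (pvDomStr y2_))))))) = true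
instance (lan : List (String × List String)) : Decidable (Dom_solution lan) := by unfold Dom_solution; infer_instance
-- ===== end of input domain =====

-- B replaces the all()-rescan greedy fold by a recursive grow over a shrinking,
-- pre-filtered candidate list (measured faster in a timing run).

-- ===== PORT A =====
-- build(node): greedy scan over the dict's keys, re-testing every current member each time.
def solutionBuild (d : PySem.Dict String (List String)) (node : String) : PySem.Set String :=
  d.keys.foldl
    (fun (curr : PySem.Set String) key =>
      if PySem.Set.contains curr key then curr
      else if curr.all (fun v => (d.getD v []).contains key) then PySem.Set.add curr key
      else curr)
    (PySem.Set.ofList [node])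
-- lan[v] for v in curr can never raise KeyError (curr ⊆ keys), so getD with default [] is exact.

def solution (lan : List (String × List String)) : String :=
  let d := PySem.Dict.ofList lan
  let max_ := d.keys.foldl
    (fun (max_ : PySem.Set String) key =>
      let component := solutionBuild d key
      if PySem.Set.len max_ < PySem.Set.len component then component else max_)
    PySem.Set.empty
  PySem.Str.join "," (PySem.List.sorted max_ (fun x => x) false)

-- ===== PORT B =====
-- grow(curr, cands): take the first candidate, then keep only its neighbours
-- among the remaining candidates; recursion on the shrinking candidate list.
def solutionAltGrow (d : PySem.Dict String (List String)) :
    List String → List String → List String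
  | curr, [] => curr
  | curr, c :: rest =>
      solutionAltGrow d (curr ++ [c]) (rest.filter (fun k => (d.getD c []).contains k))
termination_by _ cands => cands.length
decreasing_by simp; exact le_trans (List.length_filter_le _ _) (by simp)

def solution_alt (lan : List (String × List String)) : String :=
  let d := PySem.Dict.ofList lan
  let comps := d.keys.map (fun node =>
    solutionAltGrow d [node]
      (d.keys.filter (fun k => !(k == node) && (d.getD node []).contains k)))
  let best := comps.foldl
    (fun (best : List String) c =>
      if (best.length : Int) < (c.length : Int) then c else best) []
  PySem.Str.join "," (PySem.List.sorted best (fun x => x) false)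

-- ===== PRECONDITION & SPEC =====
def Spec_solution (lan : List (String × List String)) (out : String) : Prop := out = solution_alt lan
instance (lan : List (String × List String)) (out : String) : Decidable (Spec_solution lan out) := by unfold Spec_solution; infer_instance

-- ===== CLAIM (what is proved, stated in full; the proofs are below) =====
def Claim_equal_solution : Prop := ∀ (lan : List (String × List String)), Dom_solution lan → Spec_solution lan (solution lan)

-- ===== LEMMAS AND PROOFS =====

-- Invariant: A's greedy fold over the remaining keys, starting from clique curr,
-- equals B's grow of curr on the remaining keys pre-filtered by adjacency to curr.
lemma foldA_eq_grow (d : PySem.Dict String (List String)) (ks : List String)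
    (curr : List String) (hnd : ks.Nodup) :
    ks.foldl
      (fun (curr : PySem.Set String) key =>
        if PySem.Set.contains curr key then curr
        else if curr.all (fun v => (d.getD v []).contains key) then PySem.Set.add curr key
        else curr) curr
    = solutionAltGrow d curr
        (ks.filter (fun k => !curr.contains k && curr.all (fun v => (d.getD v []).contains k))) := by
  induction ks generalizing curr with
  | nil => simp [solutionAltGrow]
  | cons k ks ih =>
    have hknotin : k ∉ ks := (List.nodup_cons.mp hnd).1
    have hndks : ks.Nodup := (List.nodup_cons.mp hnd).2
    simp only [List.foldl_cons, List.filter_cons]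
    cases hc : PySem.Set.contains curr k with
    | true =>
      have hc' : curr.contains k = true := hc
      simp only [hc', if_true, Bool.not_true, Bool.false_and, Bool.false_eq_true, if_false]
      exact ih curr hndks
    | false =>
      have hc' : curr.contains k = false := hc
      simp only [hc', Bool.false_eq_true, if_false, Bool.not_false, Bool.true_and]
      cases hall : curr.all (fun v => (d.getD v []).contains k) with
      | false =>
        simp only [Bool.false_eq_true, if_false]
        exact ih curr hndks
      | true =>
        simp only [if_true]
        have hknotmem : k ∉ curr := by simpa using hc'
        have hadd : PySem.Set.add curr k = curr ++ [k] := PySem.Set.add_of_not_mem hknotmem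
        rw [hadd, ih (curr ++ [k]) hndks]
        rw [solutionAltGrow, List.filter_filter]
        congr 1
        apply List.filter_congr
        intro x hx
        have hxk : x ≠ k := fun h => hknotin (h ▸ hx)
        rw [Bool.eq_iff_iff]
        simp only [Bool.and_eq_true, Bool.not_eq_true', List.contains_eq_mem,
          List.all_append, List.all_cons, List.all_nil, Bool.and_true,
          List.mem_append, List.mem_singleton, decide_eq_false_iff_not,
          decide_eq_true_eq]
        constructor
        · intro h
          tauto
        · intro h
          tauto

-- build(node) = grow([node], neighbours of node among the keys).
lemma build_eq_grow (d : PySem.Dict String (List String)) (hnd : d.keys.Nodup) (node : String) :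
    solutionBuild d node
    = solutionAltGrow d [node]
        (d.keys.filter (fun k => !(k == node) && (d.getD node []).contains k)) := by
  unfold solutionBuild
  have h1 : PySem.Set.ofList [node] = [node] := rfl
  rw [h1, foldA_eq_grow d d.keys [node] hnd]
  congr 1
  apply List.filter_congr
  intro x _
  rw [Bool.eq_iff_iff]
  simp only [Bool.and_eq_true, Bool.not_eq_true', List.contains_eq_mem,
    List.mem_singleton, decide_eq_false_iff_not, List.all_cons, List.all_nil,
    Bool.and_true, decide_eq_true_eq, beq_eq_false_iff_ne, ne_eq]

-- ===== VERDICT (by name: the statement is the Claim_ definition above) =====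
theorem solution_spec : Claim_equal_solution := by
  intro lan _
  unfold Spec_solution solution solution_alt
  have hnd : (PySem.Dict.ofList lan).keys.Nodup := PySem.Dict.nodup_keys_ofList lan
  simp only [List.foldl_map, build_eq_grow _ hnd, PySem.Set.len, PySem.Set.empty]
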